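-- pv_equiv track=rewrite | github.com/CJOWakefield/MyLeetcode | 1774_closest_dessert_cost.py | closestCost_II
-- ===== SOURCE A (Python) =====
-- from functools import lru_cache
--
-- def closestCost_II(baseCosts: list[int], toppingCosts: list[int], target: int) -> int:
--     @lru_cache(None)
--     def dp(pos, cost):
--         if pos == len(toppingCosts) or cost > target: return cost
--         curr_cost = toppingCosts[pos]
--         res = dp(pos+1, cost), dp(pos+1, cost+curr_cost), dp(pos+1, cost+(2*curr_cost))
--         return min(res, key=lambda x: (abs(x - target), x))
--
--     res = [dp(0, cost) for cost in baseCosts]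
--     return min(res, key=lambda x: (abs(x - target), x))
-- ===== SOURCE B (Python) =====
-- def closestCost_II(baseCosts: list[int], toppingCosts: list[int], target: int) -> int:
--     # Bottom-up forward DP over sets of reachable costs (no recursion, no memo table).
--     active = {c for c in baseCosts if c <= target}
--     frozen = {c for c in baseCosts if c > target}
--     for t in toppingCosts:
--         nxt = set()
--         for c in active:
--             for x in (c, c + t, c + 2 * t):
--                 if x > target:
--                     frozen.add(x)
--                 else:
--                     nxt.add(x)
--         active = nxt
--     return min(frozen | active, key=lambda x: (abs(x - target), x))
-- ===== Notes on version B (the rewrite author's own statement) =====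
-- stated objective: faster
-- what changed: Replaces the memoized top-down recursion (min of mins over a ternary choice tree per base cost) by an iterative bottom-up BFS over sets of reachable costs, freezing any cost exceeding target, with a single final min over the candidate set.
import Mathlib
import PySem

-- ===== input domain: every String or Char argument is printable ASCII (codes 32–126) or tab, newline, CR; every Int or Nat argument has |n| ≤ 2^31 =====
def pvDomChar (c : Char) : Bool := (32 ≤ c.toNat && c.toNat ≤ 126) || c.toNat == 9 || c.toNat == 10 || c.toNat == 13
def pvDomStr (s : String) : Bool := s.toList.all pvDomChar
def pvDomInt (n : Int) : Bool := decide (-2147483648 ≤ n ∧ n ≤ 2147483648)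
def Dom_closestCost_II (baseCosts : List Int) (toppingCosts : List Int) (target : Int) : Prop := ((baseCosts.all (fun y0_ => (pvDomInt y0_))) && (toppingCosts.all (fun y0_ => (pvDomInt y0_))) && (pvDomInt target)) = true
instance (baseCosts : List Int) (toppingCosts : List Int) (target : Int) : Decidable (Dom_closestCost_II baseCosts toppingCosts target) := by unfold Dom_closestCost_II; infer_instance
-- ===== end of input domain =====

-- B replaces A's memoized recursion by an iterative frontier BFS over reachable cost sets; return-value equivalence on nonempty baseCosts.

-- ===== PORT A =====
-- Python's min(..., key=lambda x: (abs(x - target), x)): keep a, replace by b iff b's key is strictly smaller.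
def kmin (target a b : Int) : Int :=
  if |b - target| < |a - target| ∨ (|b - target| = |a - target| ∧ b < a) then b else a

-- dp(pos, cost) of A, recursing on the suffix of toppingCosts (lru_cache does not change the value).
def dpA (target : Int) : List Int → Int → Int
  | [], cost => cost
  | t0 :: rest, cost =>
    if cost > target then cost
    else
      kmin target (kmin target (dpA target rest cost) (dpA target rest (cost + t0)))
        (dpA target rest (cost + 2 * t0))

def closestCost_II (baseCosts : List Int) (toppingCosts : List Int) (target : Int) : Int :=
  match baseCosts.map (dpA target toppingCosts) with
  | [] => 0  -- Python raises ValueError (min of empty list); excluded by Pre_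
  | h :: r => r.foldl (kmin target) h

-- ===== PORT B =====
def expand3 (t c : Int) : List Int := [c, c + t, c + 2 * t]

-- route one produced cost x into (frozen, nxt)
def routeB (target : Int) (q : PySem.Set Int × PySem.Set Int) (x : Int) : PySem.Set Int × PySem.Set Int :=
  if x > target then (PySem.Set.add q.1 x, q.2) else (q.1, PySem.Set.add q.2 x)

-- one topping round: expand every active cost, routing into frozen / the new active set
def stepB (target t : Int) (p : PySem.Set Int × PySem.Set Int) : PySem.Set Int × PySem.Set Int :=
  p.2.foldl (fun q c => (expand3 t c).foldl (routeB target) q) (p.1, PySem.Set.empty)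

def closestCost_II_alt (baseCosts : List Int) (toppingCosts : List Int) (target : Int) : Int :=
  let active0 : PySem.Set Int := PySem.Set.ofList (baseCosts.filter (fun c => c ≤ target))
  let frozen0 : PySem.Set Int := PySem.Set.ofList (baseCosts.filter (fun c => c > target))
  let fa := toppingCosts.foldl (fun p t => stepB target t p) (frozen0, active0)
  match PySem.Set.union fa.1 fa.2 with
  | [] => 0  -- min over an empty set raises in Python; excluded by Pre_
  | h :: r => r.foldl (kmin target) h

-- ===== PRECONDITION & SPEC =====
-- Pre_ excludes only empty baseCosts, where both programs raise ValueError (min of an empty sequence).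
def Pre_closestCost_II (baseCosts : List Int) (toppingCosts : List Int) (target : Int) : Prop :=
  baseCosts ≠ []
instance (baseCosts : List Int) (toppingCosts : List Int) (target : Int) : Decidable (Pre_closestCost_II baseCosts toppingCosts target) := by unfold Pre_closestCost_II; infer_instance
def pvWitness_closestCost_II : List Int × List Int × Int := ([1, 7], [3, 4], 10)

def Spec_closestCost_II (baseCosts : List Int) (toppingCosts : List Int) (target : Int) (out : Int) : Prop := out = closestCost_II_alt baseCosts toppingCosts target
instance (baseCosts : List Int) (toppingCosts : List Int) (target : Int) (out : Int) : Decidable (Spec_closestCost_II baseCosts toppingCosts target out) := by unfold Spec_closestCost_II; infer_instance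

-- ===== CLAIM (what is proved, stated in full; the proofs are below) =====
def Claim_equal_closestCost_II : Prop := ∀ (baseCosts : List Int) (toppingCosts : List Int) (target : Int), Dom_closestCost_II baseCosts toppingCosts target → Pre_closestCost_II baseCosts toppingCosts target → Spec_closestCost_II baseCosts toppingCosts target (closestCost_II baseCosts toppingCosts target)

-- ===== LEMMAS AND PROOFS =====

-- total preorder underlying the Python key (abs(x - target), x); it is a total ORDER (key injective in x)
def kle (target a b : Int) : Prop :=
  |a - target| < |b - target| ∨ (|a - target| = |b - target| ∧ a ≤ b)

theorem kle_refl (target a : Int) : kle target a a := Or.inr ⟨rfl, le_refl a⟩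

theorem kle_antisymm {target a b : Int} (h1 : kle target a b) (h2 : kle target b a) : a = b := by
  unfold kle at h1 h2; omega

theorem kle_trans {target a b c : Int} (h1 : kle target a b) (h2 : kle target b c) : kle target a c := by
  unfold kle at *; omega

theorem kmin_eq_or (target a b : Int) : kmin target a b = a ∨ kmin target a b = b := by
  unfold kmin; split_ifs <;> simp

theorem kle_kmin_left (target a b : Int) : kle target (kmin target a b) a := by
  unfold kmin kle; split_ifs <;> omega

theorem kle_kmin_right (target a b : Int) : kle target (kmin target a b) b := by
  unfold kmin kle; split_ifs <;> omega

-- "m is the Python min of l by the key"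
def isMin (target : Int) (l : List Int) (m : Int) : Prop :=
  m ∈ l ∧ ∀ x ∈ l, kle target m x

theorem isMin_unique {target : Int} {l : List Int} {m m' : Int}
    (h : isMin target l m) (h' : isMin target l m') : m = m' :=
  kle_antisymm (h.2 m' h'.1) (h'.2 m h.1)

theorem isMin_congr {target : Int} {l l' : List Int} {m : Int}
    (hmem : ∀ x, x ∈ l ↔ x ∈ l') (h : isMin target l m) : isMin target l' m :=
  ⟨(hmem m).1 h.1, fun x hx => h.2 x ((hmem x).2 hx)⟩

theorem foldl_kmin_isMin (target : Int) : ∀ (l : List Int) (h : Int),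
    isMin target (h :: l) (l.foldl (kmin target) h) := by
  intro l
  induction l with
  | nil =>
    intro h
    refine ⟨by simp, ?_⟩
    intro x hx; simp at hx; subst hx; exact kle_refl _ _
  | cons b r ih =>
    intro h
    have H := ih (kmin target h b)
    rw [List.foldl_cons]
    refine ⟨?_, ?_⟩
    · rcases List.mem_cons.1 H.1 with h1 | h1
      · rcases kmin_eq_or target h b with e | e <;> rw [h1, e] <;> simp
      · simp only [List.mem_cons]; right; right; exact h1
    · intro x hx
      have hmin : kle target (List.foldl (kmin target) (kmin target h b) r) (kmin target h b) :=
        H.2 _ (by simp)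
      rcases List.mem_cons.1 hx with rfl | hx
      · exact kle_trans hmin (kle_kmin_left target x b)
      · rcases List.mem_cons.1 hx with rfl | hx
        · exact kle_trans hmin (kle_kmin_right target h x)
        · exact H.2 x (List.mem_cons_of_mem _ hx)

theorem isMin_append {target : Int} {l1 l2 : List Int} {m1 m2 : Int}
    (h1 : isMin target l1 m1) (h2 : isMin target l2 m2) :
    isMin target (l1 ++ l2) (kmin target m1 m2) := by
  constructor
  · rcases kmin_eq_or target m1 m2 with e | e <;> rw [e] <;> simp [h1.1, h2.1]
  · intro x hx
    rcases List.mem_append.1 hx with hx | hx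
    · exact kle_trans (kle_kmin_left target m1 m2) (h1.2 x hx)
    · exact kle_trans (kle_kmin_right target m1 m2) (h2.2 x hx)

-- the multiset of leaf costs of A's recursion tree
def reachL (target : Int) : List Int → Int → List Int
  | [], c => [c]
  | t0 :: rest, c =>
    if c > target then [c]
    else reachL target rest c ++ reachL target rest (c + t0) ++ reachL target rest (c + 2 * t0)

theorem reach_gt {target : Int} (tops : List Int) {c : Int} (h : c > target) :
    reachL target tops c = [c] := by
  cases tops <;> simp [reachL, h]

theorem dpA_isMin (target : Int) : ∀ (tops : List Int) (c : Int),
    isMin target (reachL target tops c) (dpA target tops c) := by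
  intro tops
  induction tops with
  | nil =>
    intro c
    refine ⟨by simp [reachL, dpA], ?_⟩
    intro x hx; simp [reachL] at hx; subst hx
    simp only [dpA]; exact kle_refl _ _
  | cons t0 rest ih =>
    intro c
    by_cases h : c > target
    · simp only [reachL, dpA, if_pos h]
      refine ⟨by simp, ?_⟩
      intro x hx; simp at hx; subst hx; exact kle_refl _ _
    · simp only [reachL, dpA, if_neg h]
      exact isMin_append (isMin_append (ih c) (ih (c + t0))) (ih (c + 2 * t0))

theorem A_flat (target : Int) (tops : List Int) : ∀ (rest : List Int) (m : Int) (L : List Int),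
    isMin target L m →
    isMin target (L ++ rest.flatMap (reachL target tops)) ((rest.map (dpA target tops)).foldl (kmin target) m) := by
  intro rest
  induction rest with
  | nil => intro m L h; simpa using h
  | cons b r ih =>
    intro m L h
    have step := isMin_append h (dpA_isMin target tops b)
    have := ih (kmin target m (dpA target tops b)) (L ++ reachL target tops b) step
    simpa [List.append_assoc] using this

-- membership characterizations of B's routing fold
theorem inner_mem1 (target t0 c : Int) (q : PySem.Set Int × PySem.Set Int) (y : Int) :
    y ∈ ((expand3 t0 c).foldl (routeB target) q).1 ↔
      y ∈ q.1 ∨ (y ∈ expand3 t0 c ∧ y > target) := by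
  simp only [expand3, List.foldl_cons, List.foldl_nil, routeB]
  split_ifs <;>
    simp only [PySem.Set.mem_add, List.mem_cons, List.not_mem_nil, or_false] <;>
    (by_cases hp : y ∈ q.1 <;> simp [hp] <;> omega)

theorem inner_mem2 (target t0 c : Int) (q : PySem.Set Int × PySem.Set Int) (y : Int) :
    y ∈ ((expand3 t0 c).foldl (routeB target) q).2 ↔
      y ∈ q.2 ∨ (y ∈ expand3 t0 c ∧ ¬ y > target) := by
  simp only [expand3, List.foldl_cons, List.foldl_nil, routeB]
  split_ifs <;>
    simp only [PySem.Set.mem_add, List.mem_cons, List.not_mem_nil, or_false] <;>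
    (by_cases hp : y ∈ q.2 <;> simp [hp] <;> omega)

theorem step_fold_mem (target t0 : Int) :
    ∀ (cs : List Int) (q : PySem.Set Int × PySem.Set Int) (y : Int),
    (y ∈ (cs.foldl (fun q c => (expand3 t0 c).foldl (routeB target) q) q).1 ↔
       y ∈ q.1 ∨ ∃ c ∈ cs, y ∈ expand3 t0 c ∧ y > target) ∧
    (y ∈ (cs.foldl (fun q c => (expand3 t0 c).foldl (routeB target) q) q).2 ↔
       y ∈ q.2 ∨ ∃ c ∈ cs, y ∈ expand3 t0 c ∧ ¬ y > target) := by
  intro cs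
  induction cs with
  | nil => intro q y; simp
  | cons c cs ih =>
    intro q y
    rw [List.foldl_cons]
    refine ⟨?_, ?_⟩
    · rw [(ih _ y).1, inner_mem1]
      constructor
      · rintro ((hq | hx) | ⟨c', hc', hx⟩)
        · exact Or.inl hq
        · exact Or.inr ⟨c, List.mem_cons_self .., hx⟩
        · exact Or.inr ⟨c', List.mem_cons_of_mem _ hc', hx⟩
      · rintro (hq | ⟨c', hc', hx⟩)
        · exact Or.inl (Or.inl hq)
        · rcases List.mem_cons.1 hc' with rfl | hc'
          · exact Or.inl (Or.inr hx)
          · exact Or.inr ⟨c', hc', hx⟩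
    · rw [(ih _ y).2, inner_mem2]
      constructor
      · rintro ((hq | hx) | ⟨c', hc', hx⟩)
        · exact Or.inl hq
        · exact Or.inr ⟨c, List.mem_cons_self .., hx⟩
        · exact Or.inr ⟨c', List.mem_cons_of_mem _ hc', hx⟩
      · rintro (hq | ⟨c', hc', hx⟩)
        · exact Or.inl (Or.inl hq)
        · rcases List.mem_cons.1 hc' with rfl | hc'
          · exact Or.inl (Or.inr hx)
          · exact Or.inr ⟨c', hc', hx⟩

theorem stepB_mem1 (target t : Int) (p : PySem.Set Int × PySem.Set Int) (y : Int) :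
    y ∈ (stepB target t p).1 ↔ y ∈ p.1 ∨ ∃ c ∈ p.2, y ∈ expand3 t c ∧ y > target := by
  unfold stepB; exact (step_fold_mem target t p.2 (p.1, PySem.Set.empty) y).1

theorem stepB_mem2 (target t : Int) (p : PySem.Set Int × PySem.Set Int) (y : Int) :
    y ∈ (stepB target t p).2 ↔ ∃ c ∈ p.2, y ∈ expand3 t c ∧ ¬ y > target := by
  unfold stepB
  have h := (step_fold_mem target t p.2 (p.1, PySem.Set.empty) y).2
  simpa [PySem.Set.empty] using h

-- expanding one topping level of reachL for an active (≤ target) cost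
theorem reach_cons_active (target t0 : Int) (rest : List Int) {c : Int} (hc : ¬ c > target) (y : Int) :
    y ∈ reachL target (t0 :: rest) c ↔ ∃ x ∈ expand3 t0 c, y ∈ reachL target rest x := by
  rw [reachL, if_neg hc]
  simp [expand3, List.mem_append]

-- the frontier invariant: frozen ∪ active after processing tops = all leaves reachable from the initial state
theorem loop_mem (target : Int) : ∀ (tops : List Int) (F A : PySem.Set Int),
    (∀ c ∈ A, ¬ c > target) → ∀ y,
    (y ∈ (tops.foldl (fun p t => stepB target t p) (F, A)).1 ∨
     y ∈ (tops.foldl (fun p t => stepB target t p) (F, A)).2) ↔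
    (y ∈ F ∨ ∃ c ∈ A, y ∈ reachL target tops c) := by
  intro tops
  induction tops with
  | nil =>
    intro F A hA y
    simp only [List.foldl_nil]
    constructor
    · rintro (h | h)
      · exact Or.inl h
      · exact Or.inr ⟨y, h, by simp [reachL]⟩
    · rintro (h | ⟨c, hc, hy⟩)
      · exact Or.inl h
      · simp [reachL] at hy; subst hy; exact Or.inr hc
  | cons t0 rest ih =>
    intro F A hA y
    rw [List.foldl_cons]
    have hA' : ∀ c ∈ (stepB target t0 (F, A)).2, ¬ c > target := by
      intro c hc
      rcases (stepB_mem2 target t0 (F, A) c).1 hc with ⟨c0, _, _, hle⟩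
      exact hle
    have hpair : (stepB target t0 (F, A)) =
        ((stepB target t0 (F, A)).1, (stepB target t0 (F, A)).2) := rfl
    rw [hpair, ih _ _ hA' y]
    simp only [stepB_mem1, stepB_mem2]
    constructor
    · rintro ((hF | ⟨c, hc, hx, hgt⟩) | ⟨x, ⟨c, hc, hx, hle⟩, hr⟩)
      · exact Or.inl hF
      · refine Or.inr ⟨c, hc, ?_⟩
        rw [reach_cons_active target t0 rest (hA c hc)]
        exact ⟨y, hx, by rw [reach_gt rest hgt]; simp⟩
      · refine Or.inr ⟨c, hc, ?_⟩
        rw [reach_cons_active target t0 rest (hA c hc)]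
        exact ⟨x, hx, hr⟩
    · rintro (hF | ⟨c, hc, hy⟩)
      · exact Or.inl (Or.inl hF)
      · rw [reach_cons_active target t0 rest (hA c hc)] at hy
        rcases hy with ⟨x, hx, hr⟩
        by_cases hgt : x > target
        · rw [reach_gt rest hgt] at hr
          simp at hr; subst hr
          exact Or.inl (Or.inr ⟨c, hc, hx, hgt⟩)
        · exact Or.inr ⟨x, ⟨c, hc, hx, hgt⟩, hr⟩

-- B's candidate set has exactly the leaves reachable from the base costs
theorem alt_cand_mem (baseCosts toppingCosts : List Int) (target : Int) (y : Int) :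
    y ∈ PySem.Set.union
          ((toppingCosts.foldl (fun p t => stepB target t p)
              (PySem.Set.ofList (baseCosts.filter (fun c => c > target)),
               PySem.Set.ofList (baseCosts.filter (fun c => c ≤ target)))).1)
          ((toppingCosts.foldl (fun p t => stepB target t p)
              (PySem.Set.ofList (baseCosts.filter (fun c => c > target)),
               PySem.Set.ofList (baseCosts.filter (fun c => c ≤ target)))).2) ↔
      y ∈ baseCosts.flatMap (reachL target toppingCosts) := by
  rw [PySem.Set.mem_union,
    loop_mem target toppingCosts _ _ (by
      intro c hc
      rw [PySem.Set.mem_ofList, List.mem_filter] at hc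
      have := hc.2
      simp at this
      omega),
    List.mem_flatMap]
  constructor
  · rintro (hF | ⟨c, hc, hy⟩)
    · rw [PySem.Set.mem_ofList, List.mem_filter] at hF
      have hgt : y > target := by have := hF.2; simpa using this
      exact ⟨y, hF.1, by rw [reach_gt toppingCosts hgt]; simp⟩
    · rw [PySem.Set.mem_ofList, List.mem_filter] at hc
      exact ⟨c, hc.1, hy⟩
  · rintro ⟨c, hc, hy⟩
    by_cases hgt : c > target
    · rw [reach_gt toppingCosts hgt] at hy
      simp at hy; subst hy
      exact Or.inl (by rw [PySem.Set.mem_ofList, List.mem_filter]; exact ⟨hc, by simpa using hgt⟩)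
    · refine Or.inr ⟨c, ?_, hy⟩
      rw [PySem.Set.mem_ofList, List.mem_filter]
      exact ⟨hc, by simpa using hgt⟩

-- ===== VERDICT (by name: the statement is the Claim_ definition above) =====
theorem closestCost_II_spec : Claim_equal_closestCost_II := by
  intro baseCosts toppingCosts target _ hpre
  unfold Spec_closestCost_II
  cases baseCosts with
  | nil => exact absurd rfl hpre
  | cons h r =>
    -- A's result is the key-min of all reachable leaf costs
    have hA : isMin target ((h :: r).flatMap (reachL target toppingCosts))
        (closestCost_II (h :: r) toppingCosts target) := by
      have := A_flat target toppingCosts r (dpA target toppingCosts h)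
        (reachL target toppingCosts h) (dpA_isMin target toppingCosts h)
      simpa [closestCost_II, List.flatMap_cons] using this
    -- B's candidate list
    rcases hcand : PySem.Set.union
        ((toppingCosts.foldl (fun p t => stepB target t p)
            (PySem.Set.ofList ((h :: r).filter (fun c => c > target)),
             PySem.Set.ofList ((h :: r).filter (fun c => c ≤ target)))).1)
        ((toppingCosts.foldl (fun p t => stepB target t p)
            (PySem.Set.ofList ((h :: r).filter (fun c => c > target)),
             PySem.Set.ofList ((h :: r).filter (fun c => c ≤ target)))).2) with
      _ | ⟨ch, cr⟩
    · -- impossible: dpA h is a reachable leaf, so the candidate set is nonempty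
      exfalso
      have hm : dpA target toppingCosts h ∈ (h :: r).flatMap (reachL target toppingCosts) :=
        List.mem_flatMap.2 ⟨h, List.mem_cons_self .., (dpA_isMin target toppingCosts h).1⟩
      have := (alt_cand_mem (h :: r) toppingCosts target (dpA target toppingCosts h)).2 hm
      rw [hcand] at this
      exact List.not_mem_nil this
    · have hB : closestCost_II_alt (h :: r) toppingCosts target = cr.foldl (kmin target) ch := by
        simp only [closestCost_II_alt]
        rw [hcand]
      have hBmin : isMin target ((h :: r).flatMap (reachL target toppingCosts))
          (closestCost_II_alt (h :: r) toppingCosts target) := by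
        rw [hB]
        refine isMin_congr (fun x => ?_) (foldl_kmin_isMin target cr ch)
        rw [← alt_cand_mem (h :: r) toppingCosts target x, hcand]
      exact isMin_unique hA hBmin
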